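-- pv_equiv track=rewrite | github.com/J-asy/Algorithms-and-Data-Structures | boyer_moore/boyer_moore.py | match_prefix_preprocess
-- ===== SOURCE A (Python) =====
-- def match_prefix_preprocess(z_array):
--     """ Returns an array whereby each position i + 1 contains an offset value that determines
--     the safe match prefix shift when a mismatch occurs at position i in the pattern
--
--     :time complexity: O(m)
--     :space complexity: O(m), where m is the length of z_array
--     """
--     match_prefix_array = [0] * (len(z_array) + 1)
--     i = len(z_array) - 1
--     while i >= 0:
--         if z_array[i] + i == len(z_array):
--             match_prefix_array[i] = z_array[i]
--         else:
--             match_prefix_array[i] = match_prefix_array[i + 1]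
--         i -= 1
--     return match_prefix_array
-- ===== SOURCE B (Python) =====
-- def match_prefix_preprocess(z_array):
--     n = len(z_array)
--     match_prefix_array = [0] * (n + 1)
--     last = 0
--     for i in range(n):
--         if z_array[i] + i == n:
--             v = z_array[i]
--             for k in range(last, i + 1):
--                 match_prefix_array[k] = v
--             last = i + 1
--     return match_prefix_array
-- ===== Notes on version B (the rewrite author's own statement) =====
-- stated objective: faster
-- what changed: Replaces A's backward carry loop (each of the m+1 cells copies its right neighbour unless its own prefix qualifies) with a single forward scan that, at each qualifying index, bulk-fills the pending interval via a running 'last' pointer, skipping per-cell work elsewhere.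
import Mathlib
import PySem

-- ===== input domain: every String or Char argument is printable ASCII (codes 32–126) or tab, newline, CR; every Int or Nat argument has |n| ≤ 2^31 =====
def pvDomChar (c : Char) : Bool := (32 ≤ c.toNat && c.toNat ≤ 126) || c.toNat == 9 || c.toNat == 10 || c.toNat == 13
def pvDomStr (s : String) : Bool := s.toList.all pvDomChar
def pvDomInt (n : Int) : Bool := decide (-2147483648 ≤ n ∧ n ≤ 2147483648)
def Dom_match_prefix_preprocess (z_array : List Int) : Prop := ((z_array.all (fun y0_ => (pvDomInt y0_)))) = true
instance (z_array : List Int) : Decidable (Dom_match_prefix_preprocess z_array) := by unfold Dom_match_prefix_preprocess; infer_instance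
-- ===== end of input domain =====

-- B replaces A's backward carry loop with a forward interval-filling scan (objective: alternative, same O(m) cost).

-- ===== PORT A =====
-- A's backward while-loop writes cell i from z[i] or from the already-written cell i+1;
-- ported as recursion on i producing the suffix match_prefix_array[i..n]: the suffix for
-- i+1 ('rest') is computed first, then cell i is prepended (z_array[i] is in range, so
-- List.getD is exact for Python's z_array[i]).
def matchPrefixGoA (z : List Int) (n i : Nat) : List Int :=
  if _h : i < n then
    let rest := matchPrefixGoA z n (i + 1)
    (if z.getD i 0 + (i : Int) = (n : Int) then z.getD i 0 else rest.headD 0) :: rest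
  else
    [0]
termination_by n - i

def match_prefix_preprocess (z_array : List Int) : List Int :=
  matchPrefixGoA z_array z_array.length 0

-- ===== PORT B =====
-- B's forward scan: state is i and the 'last' pointer; each qualifying index i emits the
-- filled segment for positions last..i, and the trailing zeros (positions last..n) are
-- emitted at the end.
def matchPrefixGoB (z : List Int) (n i last : Nat) : List Int :=
  if _h : i < n then
    if z.getD i 0 + (i : Int) = (n : Int) then
      List.replicate (i + 1 - last) (z.getD i 0) ++ matchPrefixGoB z n (i + 1) (i + 1)
    else
      matchPrefixGoB z n (i + 1) last
  else
    List.replicate (n + 1 - last) 0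
termination_by n - i

def match_prefix_preprocess_alt (z_array : List Int) : List Int :=
  matchPrefixGoB z_array z_array.length 0 0

-- ===== PRECONDITION & SPEC =====
def Spec_match_prefix_preprocess (z_array : List Int) (out : List Int) : Prop := out = match_prefix_preprocess_alt z_array
instance (z_array : List Int) (out : List Int) : Decidable (Spec_match_prefix_preprocess z_array out) := by unfold Spec_match_prefix_preprocess; infer_instance

-- ===== CLAIM (what is proved, stated in full; the proofs are below) =====
def Claim_equal_match_prefix_preprocess : Prop := ∀ (z_array : List Int), Dom_match_prefix_preprocess z_array → Spec_match_prefix_preprocess z_array (match_prefix_preprocess z_array)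

-- ===== LEMMAS AND PROOFS =====

-- Key invariant: from state (i, last) with last ≤ i ≤ n, B's scan emits (i - last) copies
-- of the head of A's suffix for i, followed by exactly A's suffix for i.
theorem goB_eq_goA (z : List Int) (n i last : Nat) (hli : last ≤ i) (hin : i ≤ n) :
    matchPrefixGoB z n i last
      = List.replicate (i - last) ((matchPrefixGoA z n i).headD 0) ++ matchPrefixGoA z n i := by
  induction i, last using matchPrefixGoB.induct z n with
  | case1 i last h hq ih =>
    rw [matchPrefixGoB, matchPrefixGoA]
    simp only [dif_pos h, if_pos hq]
    rw [ih (le_refl _) h]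
    have : i + 1 - last = (i - last) + 1 := by omega
    rw [this, List.replicate_succ', List.headD_cons]
    simp
  | case2 i last h hq ih =>
    rw [matchPrefixGoB, matchPrefixGoA]
    simp only [dif_pos h, if_neg hq]
    rw [ih (Nat.le_succ_of_le hli) h]
    have h1 : i + 1 - last = (i - last) + 1 := by omega
    rw [h1, List.replicate_succ']
    simp
  | case3 i last h =>
    rw [matchPrefixGoB, matchPrefixGoA]
    simp only [dif_neg h]
    have h1 : n + 1 - last = (i - last) + 1 := by omega
    rw [h1, List.replicate_succ']
    simp

theorem match_prefix_preprocess_spec : Claim_equal_match_prefix_preprocess := by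
  intro z _
  unfold Spec_match_prefix_preprocess match_prefix_preprocess match_prefix_preprocess_alt
  rw [goB_eq_goA z z.length 0 0 (le_refl _) (Nat.zero_le _)]
  simp
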